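-- pv_equiv track=rewrite | github.com/luozj1020/Extract_data_from_pdf_figures | extract_curve.py | group_pixels_by_x_and_y
-- ===== SOURCE A (Python) =====
-- from collections import defaultdict, deque
--
-- def group_pixels_by_x_and_y(selected_pixels):
--     x_dict = defaultdict(list)
--
--     # 按 x 坐标分组
--     for x, y in selected_pixels:
--         x_dict[x].append(y)
--
--     # 对每个 x 坐标相同的像素组，按 y 坐标分组连续的像素块
--     for x in x_dict:
--         y_values = sorted(x_dict[x])  # 对 y 坐标排序
--         pixel_blocks = []  # 存储连续 y 坐标的像素块
--         block = [y_values[0]]  # 初始化第一个块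
--
--         # 遍历 y 坐标，找到连续的像素块
--         for i in range(1, len(y_values)):
--             if y_values[i] == y_values[i - 1] + 1:
--                 block.append(y_values[i])  # 连续的 y 值加入同一个块
--             else:
--                 pixel_blocks.append(block)  # 结束当前块，加入块列表
--                 block = [y_values[i]]  # 开始一个新的块
--
--         pixel_blocks.append(block)  # 添加最后的块
--         x_dict[x] = pixel_blocks  # 将像素块的列表存回 x_dict 中
--
--     return x_dict
-- ===== SOURCE B (Python) =====
-- from collections import defaultdict
--
--
-- def group_pixels_by_x_and_y(selected_pixels):
--     x_dict = defaultdict(list)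
--
--     # phase 1: group y-values by x (first-appearance order of x)
--     for x, y in selected_pixels:
--         x_dict[x].append(y)
--
--     # phase 2: split each sorted y-list into consecutive runs, built
--     # back-to-front: walk the sorted values in reverse and prepend each y,
--     # extending the current first block when it starts at y + 1.
--     for x in x_dict:
--         blocks = []
--         for y in reversed(sorted(x_dict[x])):
--             if blocks and blocks[0][0] == y + 1:
--                 blocks[0] = [y] + blocks[0]
--             else:
--                 blocks.insert(0, [y])
--         x_dict[x] = blocks
--
--     return x_dict
-- ===== Notes on version B (the rewrite author's own statement) =====
-- stated objective: alternative
-- what changed: Phase 2 is rebuilt back-to-front: B walks each sorted y-list in reverse, prepending y to the first block when that block starts at y+1, instead of A's forward index loop over range(1, len) carrying a current-block accumulator and comparing y_values[i] with y_values[i-1].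
import Mathlib
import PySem

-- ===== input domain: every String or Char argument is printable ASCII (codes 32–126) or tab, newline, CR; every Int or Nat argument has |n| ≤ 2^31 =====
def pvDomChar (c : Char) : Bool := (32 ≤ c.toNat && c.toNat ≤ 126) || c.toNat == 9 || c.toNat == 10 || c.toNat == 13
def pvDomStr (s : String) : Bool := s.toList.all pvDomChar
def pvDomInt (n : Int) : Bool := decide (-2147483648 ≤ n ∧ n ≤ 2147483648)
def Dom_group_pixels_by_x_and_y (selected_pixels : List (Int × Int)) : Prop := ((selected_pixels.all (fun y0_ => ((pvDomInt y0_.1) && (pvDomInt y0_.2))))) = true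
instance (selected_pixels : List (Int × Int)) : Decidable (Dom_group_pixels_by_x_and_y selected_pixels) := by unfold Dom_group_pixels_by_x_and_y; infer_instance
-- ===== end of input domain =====

-- B changes only phase 2: runs are built back-to-front (reverse walk, prepending) instead of A's
-- forward index loop with a current-block accumulator; same return value, an alternative decomposition.

-- ===== PORT A =====
-- A's inner loop over range(1, len(y_values)): the carried `prev` is y_values[i-1]
-- (the previously visited element), state = (pixel_blocks, block, prev).
def pvBlocksA (y_values : List Int) : List (List Int) :=
  match y_values with
  | [] => []  -- unreachable in A (y_values[0] would raise; every stored list is nonempty)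
  | y0 :: rest =>
    let s := rest.foldl
      (fun (st : List (List Int) × List Int × Int) y =>
        if y = st.2.2 + 1 then (st.1, st.2.1 ++ [y], y)
        else (st.1 ++ [st.2.1], [y], y))
      ([], [y0], y0)
    s.1 ++ [s.2.1]

def group_pixels_by_x_and_y (selected_pixels : List (Int × Int)) : List (Int × List (List Int)) :=
  let x_dict := selected_pixels.foldl (fun d p => d.modify p.1 [] (· ++ [p.2])) PySem.Dict.empty
  x_dict.items.map (fun p => (p.1, pvBlocksA (PySem.List.sorted p.2 (fun y => y) false)))

-- ===== PORT B =====
-- one step of B's reverse walk: prepend y, extending the first block when it starts at y + 1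
def pvStepB (y : Int) (blocks : List (List Int)) : List (List Int) :=
  match blocks with
  | (h :: b) :: bs => if h = y + 1 then (y :: h :: b) :: bs else [y] :: (h :: b) :: bs
  | _ => [y] :: blocks

def group_pixels_by_x_and_y_alt (selected_pixels : List (Int × Int)) : List (Int × List (List Int)) :=
  let x_dict := selected_pixels.foldl (fun d p => d.modify p.1 [] (· ++ [p.2])) PySem.Dict.empty
  x_dict.items.map (fun p =>
    (p.1, (PySem.List.sorted p.2 (fun y => y) false).reverse.foldl
            (fun blocks y => pvStepB y blocks) []))

-- ===== PRECONDITION & SPEC =====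
def Spec_group_pixels_by_x_and_y (selected_pixels : List (Int × Int)) (out : List (Int × List (List Int))) : Prop := out = group_pixels_by_x_and_y_alt selected_pixels
instance (selected_pixels : List (Int × Int)) (out : List (Int × List (List Int))) : Decidable (Spec_group_pixels_by_x_and_y selected_pixels out) := by unfold Spec_group_pixels_by_x_and_y; infer_instance

-- ===== CLAIM (what is proved, stated in full; the proofs are below) =====
def Claim_equal_group_pixels_by_x_and_y : Prop := ∀ (selected_pixels : List (Int × Int)), Dom_group_pixels_by_x_and_y selected_pixels → Spec_group_pixels_by_x_and_y selected_pixels (group_pixels_by_x_and_y selected_pixels)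

-- ===== LEMMAS AND PROOFS =====

-- A's inner-loop body, named for the proofs (definitionally the lambda in the port of A)
def pvFA (st : List (List Int) × List Int × Int) (y : Int) : List (List Int) × List Int × Int :=
  if y = st.2.2 + 1 then (st.1, st.2.1 ++ [y], y) else (st.1 ++ [st.2.1], [y], y)

-- one step of B always yields a first block headed by y
theorem pvStepB_shape (y : Int) (r : List (List Int)) :
    ∃ c cs, pvStepB y r = (y :: c) :: cs := by
  match r with
  | [] => exact ⟨[], [], rfl⟩
  | [] :: bs => exact ⟨[], [] :: bs, rfl⟩
  | (h :: b) :: bs =>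
    by_cases hc : h = y + 1
    · exact ⟨h :: b, bs, by simp [pvStepB, hc]⟩
    · exact ⟨[], (h :: b) :: bs, by simp [pvStepB, hc]⟩

theorem pvFoldr_shape (y : Int) (t : List Int) :
    ∃ c cs, (y :: t).foldr pvStepB [] = (y :: c) :: cs := by
  simpa using pvStepB_shape y (t.foldr pvStepB [])

-- A's forward loop agrees with B's foldr, generalised over the loop state
theorem pvLoopA_eq (rest : List Int) :
    ∀ (pbs : List (List Int)) (blk : List Int) (prev : Int) (c : List Int) (cs : List (List Int)),
    (prev :: rest).foldr pvStepB [] = (prev :: c) :: cs →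
    (rest.foldl pvFA (pbs, blk, prev)).1 ++ [(rest.foldl pvFA (pbs, blk, prev)).2.1]
      = pbs ++ (blk ++ c) :: cs := by
  induction rest with
  | nil =>
    intro pbs blk prev c cs h
    have h' : ([[prev]] : List (List Int)) = (prev :: c) :: cs := by
      simpa [pvStepB] using h
    injection h' with h1 h2
    injection h1 with _ h3
    subst h3; subst h2
    simp
  | cons y t ih =>
    intro pbs blk prev c cs h
    obtain ⟨c', cs', hyt⟩ := pvFoldr_shape y t
    by_cases hc : y = prev + 1
    · have heq : (prev :: c) :: cs = (prev :: y :: c') :: cs' := by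
        rw [← h, List.foldr_cons, List.foldr_cons, ← List.foldr_cons (f := pvStepB), hyt]
        simp [pvStepB, hc]
      injection heq with h1 h2
      injection h1 with _ h3
      subst h3; subst h2
      have hstep : pvFA (pbs, blk, prev) y = (pbs, blk ++ [y], y) := by
        simp [pvFA, hc]
      rw [List.foldl_cons, hstep, ih pbs (blk ++ [y]) y c' _ hyt]
      simp
    · have heq : (prev :: c) :: cs = [prev] :: (y :: c') :: cs' := by
        rw [← h, List.foldr_cons, List.foldr_cons, ← List.foldr_cons (f := pvStepB), hyt]
        simp [pvStepB, hc]
      injection heq with h1 h2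
      injection h1 with _ h3
      subst h3; subst h2
      have hstep : pvFA (pbs, blk, prev) y = (pbs ++ [blk], [y], y) := by
        simp [pvFA, hc]
      rw [List.foldl_cons, hstep, ih (pbs ++ [blk]) [y] y c' cs' hyt]
      simp

theorem pvBlocksA_eq_foldr (ys : List Int) :
    pvBlocksA ys = ys.foldr pvStepB [] := by
  match ys with
  | [] => rfl
  | y0 :: rest =>
    obtain ⟨c, cs, h⟩ := pvFoldr_shape y0 rest
    have key := pvLoopA_eq rest [] [y0] y0 c cs h
    show (rest.foldl pvFA ([], [y0], y0)).1 ++ [(rest.foldl pvFA ([], [y0], y0)).2.1]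
        = (y0 :: rest).foldr pvStepB []
    rw [key, h]
    simp

-- ===== VERDICT (by name: the statement is the Claim_ definition above) =====
theorem group_pixels_by_x_and_y_spec : Claim_equal_group_pixels_by_x_and_y := by
  intro selected_pixels _
  unfold Spec_group_pixels_by_x_and_y group_pixels_by_x_and_y group_pixels_by_x_and_y_alt
  refine List.map_congr_left ?_
  intro p _
  rw [List.foldl_reverse, pvBlocksA_eq_foldr]
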